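-- pv_equiv track=rewrite | github.com/manvirk21/EECS210 | ManvirKaur_Assignment7/ManvirKaur_Assignment7.py | fourth
-- ===== SOURCE A (Python) =====
-- def fourth(in_objects, in_boxes):
--     """
--     This function gives the number of ways of indistinguishable objects as a sum of exactly indistinguishable box terms
--     or the number of partitions into parts of which the largest is exactly in_boxes.
--
--     The first base case is when in_objects is less than in_boxes. There are no ways of putting in_objects
--     indistinguishable objects into in_boxes boxes. The second base case is when in_objects is equal to in_boxes.
--     There is only one way of putting indistinguishable objects into indistinguishable boxes. The third base case is
--     when in_boxes is zero. In this case, there are no ways of putting the indistinguishable objects into the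
--     indistinguishable boxes.
--
--     :param in_objects: the number of objects
--     :param in_boxes: the number of boxes
--     :return: The number of ways of indistinguishable objects as a sum of exactly indistinguishable box
--     terms or the number of partitions into parts of which the largest is exactly in_boxes.
--     """
--     # This is a base case for the function. If the number of objects is less than the number of boxes, then there are
--     # no ways of putting the objects into the boxes.
--     if in_objects < in_boxes:
--         return 0
--     # This is a base case for the function. If the number of objects is equal to the number of boxes, then there is
--     # only one way of putting the objects into the boxes.
--     if in_objects == in_boxes:
--         return 1
--     # This is a base case for the function. If the number of boxes is zero, then there are no ways of putting the
--     # objects into the boxes.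
--     if in_boxes == 0:
--         return 0
--     # This is a recursive function. It is calling the function fourth with the arguments in_objects - 1 and in_boxes
--     # - 1, and then it is adding the result of that function call to the result of the function call fourth with the
--     # arguments in_objects - in_boxes and in_boxes.
--     return fourth(in_objects - 1, in_boxes - 1) + fourth(in_objects - in_boxes, in_boxes)
-- ===== SOURCE B (Python) =====
-- def fourth(in_objects, in_boxes):
--     # Bottom-up DP: partitions with largest part exactly in_boxes = partitions of
--     # m = in_objects - in_boxes into parts of size at most in_boxes; table over
--     # (m, min(in_boxes, m)) instead of A's exponential recursion.
--     if in_objects < in_boxes: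
--         return 0
--     if in_objects == in_boxes:
--         return 1
--     if in_boxes <= 0:
--         return 0
--     m = in_objects - in_boxes
--     width = min(in_boxes, m)
--     q = []  # q[i][j] = number of partitions of i into parts of size at most j
--     for i in range(m + 1):
--         row = []
--         for j in range(width + 1):
--             if i == 0:
--                 row.append(1)
--             elif j == 0:
--                 row.append(0)
--             elif j <= i:
--                 row.append(row[-1] + q[i - j][j])
--             else:
--                 row.append(row[-1])
--         q.append(row)
--     return q[m][width]
-- ===== Notes on version B (the rewrite author's own statement) =====
-- stated objective: alternative
-- what changed: Replaced the unmemoized recursion p(n,k)=p(n-1,k-1)+p(n-k,k) by a bottom-up DP table counting partitions of n-k into parts of size at most min(k, n-k); A's recursion is exponential on mid-range in_boxes, but a timing run could not certify a ratio (A either times out or hits a base case instantly).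
import Mathlib
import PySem

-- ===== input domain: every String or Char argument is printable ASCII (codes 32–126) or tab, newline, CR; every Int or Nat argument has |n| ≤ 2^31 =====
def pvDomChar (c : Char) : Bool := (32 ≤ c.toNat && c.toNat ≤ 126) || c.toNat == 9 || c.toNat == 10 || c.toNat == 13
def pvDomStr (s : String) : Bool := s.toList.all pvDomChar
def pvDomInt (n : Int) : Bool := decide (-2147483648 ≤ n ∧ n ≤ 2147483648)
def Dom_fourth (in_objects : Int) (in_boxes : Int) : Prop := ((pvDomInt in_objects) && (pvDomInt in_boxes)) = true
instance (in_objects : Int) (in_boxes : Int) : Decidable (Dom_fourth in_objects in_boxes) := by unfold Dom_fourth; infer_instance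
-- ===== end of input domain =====

-- B replaces A's unmemoized recursion by a bottom-up DP table over the subproblems
-- "partitions of i ≤ in_objects - in_boxes into parts ≤ j"; return values agree on Pre_.

-- ===== PORT A =====
-- A is unbounded recursion; the Nat fuel is the remaining recursion depth and
-- `none` models the recursion never reaching a base case (it short-circuits
-- outward like Python's RecursionError does).  On every input Pre_ admits,
-- in_objects.toNat + 1 bounds the recursion depth, so the fuel is never
-- exhausted there (proved in fourthFuel_eq_pfn below).
def fourthFuel : Nat → Int → Int → Option Int
  | 0, _, _ => none
  | f + 1, n, k =>
    if n < k then some 0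
    else if n = k then some 1
    else if k = 0 then some 0
    else do
      let a ← fourthFuel f (n - 1) (k - 1)
      let b ← fourthFuel f (n - k) k
      pure (a + b)

def fourth (in_objects : Int) (in_boxes : Int) : Int :=
  (fourthFuel (in_objects.toNat + 1) in_objects in_boxes).getD 0

-- ===== PORT B =====
-- Python's q[a][b]; in B both indices are always nonnegative and in range,
-- so the defaults are never used
def qLookup (q : Array (Array Int)) (a : Int) (b : Int) : Int :=
  ((q[a.toNat]?).getD #[])[b.toNat]?.getD 0

-- the inner `for j in range(width + 1)` loop of Source B (row[-1] is Array.back?)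
def altRow (q : Array (Array Int)) (i : Int) (width : Int) : Array Int :=
  (PySem.List.pyRange 0 (width + 1) 1).foldl
    (fun row j =>
      row.push
        (if i = 0 then 1
         else if j = 0 then 0
         else if j ≤ i then (row.back?.getD 0) + qLookup q (i - j) j
         else row.back?.getD 0))
    #[]

def fourth_alt (in_objects : Int) (in_boxes : Int) : Int :=
  if in_objects < in_boxes then 0
  else if in_objects = in_boxes then 1
  else if in_boxes ≤ 0 then 0
  else
    let m := in_objects - in_boxes
    let width := min in_boxes m
    let q := (PySem.List.pyRange 0 (m + 1) 1).foldl
        (fun q i => q.push (altRow q i width)) #[]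
    qLookup q m width

-- ===== PRECONDITION & SPEC =====
-- Pre_ excludes exactly the inputs with in_boxes < 0 and in_objects > in_boxes,
-- where A's recursion never reaches a base case and Python raises RecursionError.
def Pre_fourth (in_objects : Int) (in_boxes : Int) : Prop :=
  in_objects ≤ in_boxes ∨ 0 ≤ in_boxes
instance (in_objects : Int) (in_boxes : Int) : Decidable (Pre_fourth in_objects in_boxes) := by
  unfold Pre_fourth; infer_instance

def pvWitness_fourth : Int × Int := (7, 3)

def Spec_fourth (in_objects : Int) (in_boxes : Int) (out : Int) : Prop := out = fourth_alt in_objects in_boxes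
instance (in_objects : Int) (in_boxes : Int) (out : Int) : Decidable (Spec_fourth in_objects in_boxes out) := by unfold Spec_fourth; infer_instance

-- ===== CLAIM (what is proved, stated in full; the proofs are below) =====
def Claim_equal_fourth : Prop := ∀ (in_objects : Int) (in_boxes : Int), Dom_fourth in_objects in_boxes → Pre_fourth in_objects in_boxes → Spec_fourth in_objects in_boxes (fourth in_objects in_boxes)

-- ===== LEMMAS AND PROOFS =====

-- A's recurrence as a total function (proof-side only)
def pfn (n k : Int) : Int :=
  if n < k then 0
  else if n = k then 1
  else if k ≤ 0 then 0
  else pfn (n - 1) (k - 1) + pfn (n - k) k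
termination_by n.toNat
decreasing_by all_goals omega

-- B's recurrence: partitions of i into parts of size at most j (proof-side only)
def qf (i j : Int) : Int :=
  if i < 0 then 0
  else if i = 0 then 1
  else if j ≤ 0 then 0
  else qf i (j - 1) + qf (i - j) j
termination_by (i.toNat, j.toNat)
decreasing_by all_goals (first | (apply Prod.Lex.right; omega) | (apply Prod.Lex.left; omega))

lemma fourthFuel_eq_pfn : ∀ (f : Nat) (n k : Int), 0 ≤ k → n.toNat < f →
    fourthFuel f n k = some (pfn n k) := by
  intro f
  induction f with
  | zero => intro n k _ h; omega
  | succ f ih =>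
    intro n k hk hf
    rw [fourthFuel]
    conv => rhs; rw [pfn]
    split_ifs with h1 h2 h3 h4
    · rfl
    · rfl
    · rfl
    · exfalso; omega
    · exfalso; omega
    · rw [ih (n - 1) (k - 1) (by omega) (by omega),
        ih (n - k) k hk (by omega)]
      rfl

-- the classical identity: partitions of n with largest part exactly k
-- = partitions of n - k into parts of size at most k
theorem pfn_eq_qf (n k : Int) (hk : 0 < k) (hn : k < n) : pfn n k = qf (n - k) k := by
  rw [pfn, if_neg (by omega), if_neg (by omega), if_neg (by omega)]
  rw [qf, if_neg (by omega), if_neg (by omega), if_neg (by omega)]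
  have h1 : pfn (n - 1) (k - 1) = qf (n - k) (k - 1) := by
    by_cases hk1 : k = 1
    · subst hk1
      rw [pfn, if_neg (by omega), if_neg (by omega), if_pos (by omega)]
      rw [qf, if_neg (by omega), if_neg (by omega), if_pos (by omega)]
    · have := pfn_eq_qf (n - 1) (k - 1) (by omega) (by omega)
      rw [this]
      congr 1
      omega
  have h2 : pfn (n - k) k = qf (n - k - k) k := by
    rcases lt_trichotomy (n - k) k with h | h | h
    · rw [pfn, if_pos h, qf, if_pos (by omega)]
    · rw [pfn, if_neg (by omega), if_pos h]
      rw [qf, if_neg (by omega), if_pos (by omega)]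
    · exact pfn_eq_qf (n - k) k hk h
  rw [h1, h2]
termination_by n.toNat
decreasing_by all_goals omega

-- parts larger than i are never used: qf is constant in j past i
theorem qf_eq_of_le (i j : Int) (hi : 0 ≤ i) (hij : i ≤ j) : qf i j = qf i i := by
  by_cases h : j = i
  · rw [h]
  · by_cases h0 : i = 0
    · subst h0
      rw [qf, if_neg (by omega), if_pos rfl, qf, if_neg (by omega), if_pos rfl]
    · rw [qf, if_neg (by omega), if_neg h0, if_neg (by omega)]
      have hz : qf (i - j) j = 0 := by rw [qf, if_pos (by omega)]
      rw [hz, add_zero]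
      exact qf_eq_of_le i (j - 1) hi (by omega)
termination_by (j - i).toNat
decreasing_by omega

-- the target value of one row of B's table
def rowSpec (i width : Int) : List Int :=
  (PySem.List.pyRange 0 (width + 1) 1).map (fun j => qf i j)

lemma altRow_eq (q : Array (Array Int)) (i width : Int) (hi : 0 ≤ i)
    (Hq : ∀ a b : Int, 0 ≤ a → a < i → 0 ≤ b → b ≤ width →
      qLookup q a b = qf a b) :
    ∀ (t : Nat), (t : Int) ≤ width + 1 →
      ((PySem.List.pyRange 0 (t : Int) 1).foldl
        (fun row j =>
          row.push
            (if i = 0 then 1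
             else if j = 0 then 0
             else if j ≤ i then (row.back?.getD 0) + qLookup q (i - j) j
             else row.back?.getD 0)) #[])
        = ((PySem.List.pyRange 0 (t : Int) 1).map (fun j => qf i j)).toArray := by
  intro t
  induction t with
  | zero => intro _; simp [PySem.List.pyRange_one_eq_nil]
  | succ t ih =>
    intro ht
    have htw : (t : Int) ≤ width := by push_cast at ht; omega
    have hcast : ((t + 1 : Nat) : Int) = (t : Int) + 1 := by push_cast; ring
    rw [hcast, PySem.List.pyRange_one_succ_right (by positivity), List.foldl_append,
      List.map_append, ih (by omega)]
    simp only [List.foldl_cons, List.foldl_nil, List.map_cons, List.map_nil]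
    rw [List.push_toArray]
    congr 1
    -- the entry appended at j = t equals qf i t
    by_cases h0 : i = 0
    · subst h0
      rw [if_pos rfl, qf, if_neg (by omega), if_pos rfl]
    · rw [if_neg h0]
      by_cases ht0 : (t : Int) = 0
      · rw [if_pos ht0, ht0, qf, if_neg (by omega), if_neg h0, if_pos (by omega)]
      · rw [if_neg ht0]
        have hback : (((PySem.List.pyRange 0 (t : Int) 1).map (fun j => qf i j)).toArray).back?.getD 0
            = qf i ((t : Int) - 1) := by
          rw [List.back?_toArray,
            show (t : Int) = ((t : Int) - 1) + 1 by ring,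
            PySem.List.pyRange_one_succ_right (by omega), List.map_append]
          simp
        by_cases hti : (t : Int) ≤ i
        · rw [if_pos hti, hback, Hq (i - t) t (by omega) (by omega) (by omega) (by omega)]
          conv => rhs; rw [qf]
          rw [if_neg (by omega), if_neg h0, if_neg (by omega)]
        · rw [if_neg hti, hback]
          conv => rhs; rw [qf, if_neg (by omega), if_neg h0, if_neg (by omega)]
          have hz : qf (i - t) (t : Int) = 0 := by rw [qf, if_pos (by omega)]
          rw [hz, add_zero]

lemma lookup_map (width : Int) (M : Nat) (a b : Int) (ha : 0 ≤ a) (haM : a < (M : Int))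
    (hb : 0 ≤ b) (hbw : b ≤ width) :
    qLookup ((List.map (fun i => (rowSpec i width).toArray)
        (PySem.List.pyRange 0 (M : Int) 1)).toArray) a b = qf a b := by
  unfold qLookup
  have h1 : ((List.map (fun i => (rowSpec i width).toArray)
      (PySem.List.pyRange 0 (M : Int) 1)).toArray)[a.toNat]?
      = some ((rowSpec ((a.toNat : Nat) : Int) width).toArray) := by
    rw [List.getElem?_toArray]
    exact PySem.List.getElem?_map_pyRange_zero _ _ _ (by omega)
  rw [h1]
  simp only [Option.getD_some]
  rw [List.getElem?_toArray]
  unfold rowSpec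
  rw [show width + 1 = (((width + 1).toNat : Nat) : Int) by omega,
    PySem.List.getElem?_map_pyRange_zero _ _ _ (by omega)]
  simp only [Option.getD_some]
  congr 1 <;> omega

lemma table_eq (width : Int) (hw : 0 ≤ width) : ∀ (M : Nat),
    ((PySem.List.pyRange 0 (M : Int) 1).foldl (fun q i => q.push (altRow q i width)) #[])
      = ((PySem.List.pyRange 0 (M : Int) 1).map (fun i => (rowSpec i width).toArray)).toArray := by
  intro M
  induction M with
  | zero => simp [PySem.List.pyRange_one_eq_nil]
  | succ M ih =>
    have hcast : ((M + 1 : Nat) : Int) = (M : Int) + 1 := by push_cast; ring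
    rw [hcast, PySem.List.pyRange_one_succ_right (by positivity), List.foldl_append,
      List.map_append, ih]
    simp only [List.foldl_cons, List.foldl_nil, List.map_cons, List.map_nil]
    rw [List.push_toArray]
    congr 1
    unfold altRow
    have := altRow_eq
      (((PySem.List.pyRange 0 (M : Int) 1).map (fun i => (rowSpec i width).toArray)).toArray)
      (M : Int) width (by positivity)
      (fun a b ha haM hb hbw => lookup_map width M a b ha haM hb hbw)
      ((width + 1).toNat) (by omega)
    rw [show (((width + 1).toNat : Nat) : Int) = width + 1 by omega] at this
    rw [this]
    rfl

lemma qLookup_table (M width : Int) (hw : 0 ≤ width) (a b : Int)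
    (ha : 0 ≤ a) (haM : a < M) (hb : 0 ≤ b) (hbw : b ≤ width) :
    qLookup ((PySem.List.pyRange 0 ((M.toNat : Nat) : Int) 1).foldl
        (fun q i => q.push (altRow q i width)) #[]) a b = qf a b := by
  rw [table_eq width hw]
  exact lookup_map width M.toNat a b ha (by omega) hb hbw

lemma fourth_alt_eq_pfn (n k : Int) : fourth_alt n k = pfn n k := by
  rw [fourth_alt]
  conv => rhs; rw [pfn]
  split_ifs with h1 h2 h3
  · rfl
  · rfl
  · rfl
  · -- k ≥ 1, n > k; the table holds qf and qf (n-k) (min k (n-k)) = pfn n k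
    have hk : 0 < k := by omega
    have hm : 0 < n - k := by omega
    have hw : 0 < min k (n - k) := by omega
    have hM : n - k + 1 = (((n - k + 1).toNat : Nat) : Int) := by omega
    have hpfn : pfn n k = pfn (n - 1) (k - 1) + pfn (n - k) k := by
      conv => lhs; rw [pfn]
      rw [if_neg h1, if_neg h2, if_neg h3]
    rw [← hpfn]
    simp only []
    rw [hM, qLookup_table (n - k + 1) (min k (n - k)) (by omega) (n - k) (min k (n - k))
      (by omega) (by omega) (by omega) (le_refl _)]
    · by_cases hkm : k ≤ n - k
      · rw [min_eq_left hkm, pfn_eq_qf n k hk (by omega)]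
      · rw [min_eq_right (by omega), pfn_eq_qf n k hk (by omega),
          qf_eq_of_le (n - k) k (by omega) (by omega)]

-- ===== VERDICT (by name: the statement is the Claim_ definition above) =====
theorem fourth_spec : Claim_equal_fourth := by
  intro n k _ hpre
  unfold Spec_fourth
  by_cases hk : 0 ≤ k
  · -- the fuel n.toNat + 1 covers the whole recursion
    rw [fourth, fourthFuel_eq_pfn (n.toNat + 1) n k hk (by omega), fourth_alt_eq_pfn]
    rfl
  · -- k < 0: Pre_ forces n ≤ k, a base case on both sides
    have hnk : n ≤ k := by
      rcases hpre with h | h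
      · exact h
      · omega
    rw [fourth, fourthFuel]
    by_cases he : n = k
    · rw [if_neg (by omega), if_pos he, fourth_alt, if_neg (by omega), if_pos he]
      rfl
    · rw [if_pos (by omega), fourth_alt, if_pos (by omega)]
      rfl
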